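-- pv_equiv track=rewrite | github.com/bluek1te/algos | yuckdonalds.py | solution
-- ===== SOURCE A (Python) =====
-- from typing import List
--
-- def solution(m: List[int], p: List[int], k: int) -> int:
--     n = len(m)
--     a = [0] * n
--     for i in range(1, n):
--         a[i] = p[i]
--         for j in range(1, i):
--             if a[j] + p[i] > a[i] and i - j > k:
--                 a[i] = a[j] + p[i]
--
--     return max(a)
-- ===== SOURCE B (Python) =====
-- def solution(m, p, k):
--     n = len(m)
--     a = [0] * n
--     pm = 0   # running max(0, a[j]) over the eligible window j < i - k
--     ans = 0
--     for i in range(1, n):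
--         j = min(i - 1, i - k - 1)   # newest index entering the window
--         if j >= 1:
--             pm = max(pm, a[j])
--         a[i] = p[i] + pm
--         ans = max(ans, a[i])
--     return ans
-- ===== Notes on version B (the rewrite author's own statement) =====
-- stated objective: faster
-- what changed: Replaces the O(n^2) inner scan over all earlier DP entries with a running prefix maximum over the window of indices j < i-k (one new index enters per step), making one O(n) pass.
import Mathlib
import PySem

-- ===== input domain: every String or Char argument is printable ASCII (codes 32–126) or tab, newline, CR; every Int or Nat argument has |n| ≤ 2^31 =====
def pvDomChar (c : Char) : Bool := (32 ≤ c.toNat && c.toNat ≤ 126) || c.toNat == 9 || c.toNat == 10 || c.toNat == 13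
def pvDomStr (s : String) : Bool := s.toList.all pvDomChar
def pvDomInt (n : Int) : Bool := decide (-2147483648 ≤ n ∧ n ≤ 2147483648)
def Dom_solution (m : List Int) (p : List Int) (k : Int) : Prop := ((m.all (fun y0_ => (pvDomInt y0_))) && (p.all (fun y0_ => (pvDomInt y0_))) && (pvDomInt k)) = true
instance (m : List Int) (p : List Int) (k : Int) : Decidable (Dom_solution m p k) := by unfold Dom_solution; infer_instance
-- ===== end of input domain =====

-- B replaces A's quadratic rescan of earlier DP values by a running prefix max over the
-- admissible window j < i - k (objective: faster, asymptotic O(n^2) → O(n)).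

-- ===== PORT A =====
-- inner loop body: 'if a[j] + p[i] > a[i] and i - j > k: a[i] = a[j] + p[i]'
def innerA (p : List Int) (k : Int) (i : Int) (a : List Int) (j : Int) : List Int :=
  if PySem.List.pyGetD a j 0 + PySem.List.pyGetD p i 0 > PySem.List.pyGetD a i 0 ∧ i - j > k then
    PySem.List.pySetD a i (PySem.List.pyGetD a j 0 + PySem.List.pyGetD p i 0)
  else a

-- outer loop body: 'a[i] = p[i]; for j in range(1, i): …'
def outerA (p : List Int) (k : Int) (a : List Int) (i : Int) : List Int :=
  (PySem.List.pyRange 1 i 1).foldl (innerA p k i) (PySem.List.pySetD a i (PySem.List.pyGetD p i 0))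

def solution (m : List Int) (p : List Int) (k : Int) : Int :=
  let n : Int := (m.length : Int)
  let a : List Int := List.replicate m.length 0
  let a := (PySem.List.pyRange 1 n 1).foldl (outerA p k) a
  (PySem.List.max? a (fun x => x)).getD 0

-- ===== PORT B =====
-- loop body of Source B: state (a, pm, ans)
def stepB (p : List Int) (k : Int) (s : List Int × Int × Int) (i : Int) : List Int × Int × Int :=
  let j := min (i - 1) (i - k - 1)
  let pm := if 1 ≤ j then max s.2.1 (PySem.List.pyGetD s.1 j 0) else s.2.1
  let ai := PySem.List.pyGetD p i 0 + pm
  (PySem.List.pySetD s.1 i ai, pm, max s.2.2 ai)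

def solution_alt (m : List Int) (p : List Int) (k : Int) : Int :=
  ((PySem.List.pyRange 1 (m.length : Int) 1).foldl (stepB p k)
    (List.replicate m.length 0, 0, 0)).2.2

-- ===== PRECONDITION & SPEC =====
-- Pre_: Python A raises ValueError on m = [] (max of empty list) and IndexError when
-- len(m) ≥ 2 and len(p) < len(m); everywhere else it returns.
def Pre_solution (m : List Int) (p : List Int) (k : Int) : Prop :=
  m ≠ [] ∧ (m.length ≤ 1 ∨ m.length ≤ p.length)
instance (m : List Int) (p : List Int) (k : Int) : Decidable (Pre_solution m p k) := by
  unfold Pre_solution; infer_instance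
def pvWitness_solution : List Int × List Int × Int := ([1, 2, 3], [2, -1, 3], 0)

def Spec_solution (m : List Int) (p : List Int) (k : Int) (out : Int) : Prop := out = solution_alt m p k
instance (m : List Int) (p : List Int) (k : Int) (out : Int) : Decidable (Spec_solution m p k out) := by unfold Spec_solution; infer_instance

-- ===== CLAIM (what is proved, stated in full; the proofs are below) =====
def Claim_equal_solution : Prop := ∀ (m : List Int) (p : List Int) (k : Int), Dom_solution m p k → Pre_solution m p k → Spec_solution m p k (solution m p k)

-- ===== LEMMAS AND PROOFS =====

-- max(0, max of a[j] for j in [1, c))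
def wmax (a : List Int) (c : Int) : Int :=
  ((PySem.List.pyRange 1 c 1).map (fun j => PySem.List.pyGetD a j 0)).foldl max 0

theorem pyGetD_pySetD_int (a : List Int) (i j v d : Int) (hi : 0 ≤ i) (hil : i < (a.length : Int))
    (hj : 0 ≤ j) :
    PySem.List.pyGetD (PySem.List.pySetD a i v) j d = if j = i then v else PySem.List.pyGetD a j d := by
  rw [show i = ((i.toNat : Nat) : Int) by omega, show j = ((j.toNat : Nat) : Int) by omega]
  rw [PySem.List.pyGetD_pySetD_natCast a i.toNat j.toNat v d (by omega)]
  by_cases h : j.toNat = i.toNat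
  · simp [h]
  · rw [if_neg h, if_neg (by omega)]

theorem pySetD_pySetD (a : List Int) (i v w : Int) (hi : 0 ≤ i) :
    PySem.List.pySetD (PySem.List.pySetD a i v) i w = PySem.List.pySetD a i w := by
  rw [PySem.List.pySetD_of_nonneg _ _ hi, PySem.List.pySetD_of_nonneg _ _ hi,
      PySem.List.pySetD_of_nonneg _ _ hi, List.set_set]

theorem wmax_nil (a : List Int) (c : Int) (h : c ≤ 1) : wmax a c = 0 := by
  unfold wmax
  rw [PySem.List.pyRange_one_eq_nil h]
  rfl

theorem wmax_succ (a : List Int) (c : Int) (h : 1 ≤ c) :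
    wmax a (c + 1) = max (wmax a c) (PySem.List.pyGetD a c 0) := by
  unfold wmax
  rw [PySem.List.pyRange_one_succ_right h]
  simp

theorem wmax_set (a : List Int) (c i : Int) (v : Int) (hc : c ≤ i) (hi : 0 ≤ i)
    (hil : i < (a.length : Int)) : wmax (PySem.List.pySetD a i v) c = wmax a c := by
  unfold wmax
  congr 1
  apply List.map_congr_left
  intro j hj
  rw [PySem.List.mem_pyRange_one] at hj
  rw [pyGetD_pySetD_int a i j v 0 hi hil (by omega), if_neg (by omega)]

theorem filter_pyRange_lt (a b c : Int) :
    (PySem.List.pyRange a b 1).filter (fun j => decide (j < c)) =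
      PySem.List.pyRange a (min b c) 1 := by
  by_cases hab : b ≤ a
  · rw [PySem.List.pyRange_one_eq_nil hab, PySem.List.pyRange_one_eq_nil (by omega)]
    rfl
  · push_neg at hab
    rw [PySem.List.pyRange_one_cons hab]
    by_cases hac : a < c
    · rw [PySem.List.pyRange_one_cons (by omega : a < min b c)]
      simp only [List.filter_cons, decide_eq_true_eq, hac, if_pos]
      rw [filter_pyRange_lt (a+1) b c]
    · push_neg at hac
      rw [PySem.List.pyRange_one_eq_nil (by omega : min b c ≤ a)]
      simp only [List.filter_cons, decide_eq_true_eq]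
      rw [if_neg (by omega)]
      rw [filter_pyRange_lt (a+1) b c, PySem.List.pyRange_one_eq_nil (by omega : min b c ≤ a + 1)]
termination_by (b - a).toNat
decreasing_by all_goals omega

theorem foldl_max_add (L : List Int) (g : Int → Int) (q c : Int) :
    L.foldl (fun acc j => max acc (g j + q)) (q + c) = q + L.foldl (fun acc j => max acc (g j)) c := by
  induction L generalizing c with
  | nil => simp
  | cons x t ih =>
    simp only [List.foldl_cons]
    rw [show max (q + c) (g x + q) = q + max c (g x) by omega, ih]

theorem inner_shape (p : List Int) (k i : Int) (a : List Int) (L : List Int)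
    (hi0 : 0 ≤ i) (hil : i < (a.length : Int)) (hL : ∀ j ∈ L, 0 ≤ j ∧ j < i) (q0 : Int) :
    L.foldl (innerA p k i) (PySem.List.pySetD a i q0) =
      PySem.List.pySetD a i (L.foldl
        (fun acc j => if PySem.List.pyGetD a j 0 + PySem.List.pyGetD p i 0 > acc ∧ i - j > k
          then PySem.List.pyGetD a j 0 + PySem.List.pyGetD p i 0 else acc) q0) := by
  induction L generalizing q0 with
  | nil => simp
  | cons x t ih =>
    have hx := hL x (by simp)
    simp only [List.foldl_cons]
    rw [show innerA p k i (PySem.List.pySetD a i q0) x =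
        PySem.List.pySetD a i (if PySem.List.pyGetD a x 0 + PySem.List.pyGetD p i 0 > q0 ∧ i - x > k
          then PySem.List.pyGetD a x 0 + PySem.List.pyGetD p i 0 else q0) by
      have hgx : PySem.List.pyGetD (PySem.List.pySetD a i q0) x 0 = PySem.List.pyGetD a x 0 := by
        rw [pyGetD_pySetD_int a i x q0 0 hi0 hil hx.1, if_neg (by omega)]
      have hgi : PySem.List.pyGetD (PySem.List.pySetD a i q0) i 0 = q0 := by
        rw [pyGetD_pySetD_int a i i q0 0 hi0 hil hi0, if_pos rfl]
      unfold innerA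
      rw [hgx, hgi]
      split_ifs with h
      · rw [pySetD_pySetD a i q0 _ hi0]
      · rfl]
    exact ih (fun j hj => hL j (by simp [hj])) _

theorem inner_value (k i : Int) (a : List Int) (q : Int) :
    (PySem.List.pyRange 1 i 1).foldl
        (fun acc j => if PySem.List.pyGetD a j 0 + q > acc ∧ i - j > k
          then PySem.List.pyGetD a j 0 + q else acc) q =
      q + wmax a (min i (i - k)) := by
  have hcg : ∀ (acc : Int), ∀ j ∈ PySem.List.pyRange 1 i 1,
      (if PySem.List.pyGetD a j 0 + q > acc ∧ i - j > k then PySem.List.pyGetD a j 0 + q else acc) =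
        (if i - j > k then max acc (PySem.List.pyGetD a j 0 + q) else acc) := by
    intro acc j _
    by_cases hk : i - j > k
    · simp only [hk, and_true, if_true]
      split_ifs with h <;> omega
    · simp only [hk, and_false, if_false]
  rw [PySem.List.foldl_congr_mem _ _
      (fun acc j => if i - j > k then max acc (PySem.List.pyGetD a j 0 + q) else acc) _ hcg]
  rw [PySem.List.foldl_ite_eq_foldl_filter (fun j => i - j > k)]
  rw [List.filter_congr (fun j _ => by simp only [decide_eq_decide]; omega :
        ∀ j ∈ PySem.List.pyRange 1 i 1, decide (i - j > k) = decide (j < i - k))]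
  rw [filter_pyRange_lt 1 i (i - k)]
  have h := foldl_max_add (PySem.List.pyRange 1 (min i (i - k)) 1)
      (fun j => PySem.List.pyGetD a j 0) q 0
  simp only [add_zero] at h
  rw [h]
  unfold wmax
  rw [List.foldl_map]

theorem outerA_eq (p : List Int) (k i : Int) (a : List Int)
    (hi0 : 1 ≤ i) (hil : i < (a.length : Int)) :
    outerA p k a i = PySem.List.pySetD a i (PySem.List.pyGetD p i 0 + wmax a (min i (i - k))) := by
  unfold outerA
  rw [inner_shape p k i a (PySem.List.pyRange 1 i 1) (by omega) hil
      (fun j hj => by rw [PySem.List.mem_pyRange_one] at hj; omega) (PySem.List.pyGetD p i 0)]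
  rw [inner_value]

def runA (m p : List Int) (k : Int) (t : Nat) : List Int :=
  (PySem.List.pyRange 1 (t : Int) 1).foldl (outerA p k) (List.replicate m.length 0)

def runB (m p : List Int) (k : Int) (t : Nat) : List Int × Int × Int :=
  (PySem.List.pyRange 1 (t : Int) 1).foldl (stepB p k) (List.replicate m.length 0, 0, 0)

theorem main_inv (m p : List Int) (k : Int) (t : Nat) (h1 : 1 ≤ t) (ht : t ≤ m.length) :
    (runB m p k t).1 = runA m p k t ∧ (runA m p k t).length = m.length ∧
      PySem.List.pyGetD (runA m p k t) 0 0 = 0 ∧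
      (runB m p k t).2.1 = wmax (runA m p k t) (min ((t : Int) - 1) ((t : Int) - k - 1)) ∧
      (runB m p k t).2.2 = ((PySem.List.pyRange 1 (t : Int) 1).map
        (fun j => PySem.List.pyGetD (runA m p k t) j 0)).foldl max 0 := by
  induction t, h1 using Nat.le_induction with
  | base =>
    unfold runA runB
    rw [PySem.List.pyRange_one_eq_nil (by omega)]
    refine ⟨rfl, by simp, ?_, ?_, rfl⟩
    · rw [PySem.List.pyGetD_zero]
      cases m <;> simp [List.getD]
    · rw [wmax_nil _ _ (by omega)]
      rfl
  | succ t h1 ih =>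
    obtain ⟨hS1, hlen, h0, hpm, hans⟩ := ih (by omega)
    have hrange : PySem.List.pyRange 1 ((t + 1 : Nat) : Int) 1 =
        PySem.List.pyRange 1 (t : Int) 1 ++ [(t : Int)] := by
      push_cast
      exact PySem.List.pyRange_one_succ_right (by omega)
    have hA : runA m p k (t + 1) = outerA p k (runA m p k t) (t : Int) := by
      unfold runA
      rw [hrange, List.foldl_append]
      rfl
    have hB : runB m p k (t + 1) = stepB p k (runB m p k t) (t : Int) := by
      unfold runB
      rw [hrange, List.foldl_append]
      rfl
    set a := runA m p k t with ha
    have hlt : (t : Int) < (a.length : Int) := by omega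
    have h1i : (1 : Int) ≤ (t : Int) := by exact_mod_cast h1
    set j' : Int := min ((t : Int) - 1) ((t : Int) - k - 1) with hj'
    have emin : min ((t : Int)) ((t : Int) - k) = j' + 1 := by omega
    have hAe : runA m p k (t + 1) =
        PySem.List.pySetD a (t : Int)
          (PySem.List.pyGetD p (t : Int) 0 + wmax a (j' + 1)) := by
      rw [hA, outerA_eq p k (t : Int) a h1i hlt, emin]
    have hpm' : (if 1 ≤ j' then max (runB m p k t).2.1 (PySem.List.pyGetD a j' 0)
        else (runB m p k t).2.1) = wmax a (j' + 1) := by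
      rw [hpm]
      by_cases hj1 : 1 ≤ j'
      · rw [if_pos hj1, wmax_succ a j' hj1]
      · rw [if_neg hj1, wmax_nil a j' (by omega), wmax_nil a (j' + 1) (by omega)]
    have hBe : runB m p k (t + 1) =
        (PySem.List.pySetD a (t : Int) (PySem.List.pyGetD p (t : Int) 0 + wmax a (j' + 1)),
         wmax a (j' + 1),
         max (runB m p k t).2.2 (PySem.List.pyGetD p (t : Int) 0 + wmax a (j' + 1))) := by
      rw [hB]
      simp only [stepB]
      rw [hS1, ← hj', hpm']
    have hstab : ∀ j : Int, 0 ≤ j → j < (t : Int) →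
        PySem.List.pyGetD (runA m p k (t + 1)) j 0 = PySem.List.pyGetD a j 0 := by
      intro j hj0 hjt
      rw [hAe, pyGetD_pySetD_int a (t : Int) j _ 0 (by omega) hlt hj0, if_neg (by omega)]
    refine ⟨?_, ?_, ?_, ?_, ?_⟩
    · rw [hBe, hAe]
    · rw [hAe, PySem.List.length_pySetD]
      omega
    · rw [hstab 0 le_rfl (by omega)]
      exact h0
    · rw [hBe, hAe]
      have e2 : min (((t + 1 : Nat) : Int) - 1) (((t + 1 : Nat) : Int) - k - 1) = j' + 1 := by
        push_cast
        omega
      rw [e2, wmax_set a (j' + 1) (t : Int) _ (by omega) (by omega) hlt]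
    · rw [hBe]
      have e3 : ((PySem.List.pyRange 1 (((t + 1 : Nat)) : Int) 1).map
          (fun j => PySem.List.pyGetD (runA m p k (t + 1)) j 0)) =
          ((PySem.List.pyRange 1 ((t : Nat) : Int) 1).map
            (fun j => PySem.List.pyGetD a j 0)) ++ [PySem.List.pyGetD p (t : Int) 0 + wmax a (j' + 1)] := by
        rw [hrange, List.map_append]
        congr 1
        · apply List.map_congr_left
          intro j hj
          rw [PySem.List.mem_pyRange_one] at hj
          exact hstab j (by omega) hj.2
        · simp only [List.map_cons, List.map_nil]
          rw [hAe, pyGetD_pySetD_int a (t : Int) (t : Int) _ 0 (by omega) hlt (by omega), if_pos rfl]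
      rw [e3, List.foldl_append, hans]
      rfl

-- ===== VERDICT (by name: the statement is the Claim_ definition above) =====
theorem solution_spec : Claim_equal_solution := by
  unfold Claim_equal_solution
  intro m p k _ hpre
  unfold Spec_solution solution solution_alt
  have hn : 1 ≤ m.length := by
    rcases m with _ | ⟨x, ms⟩
    · exact absurd rfl hpre.1
    · simp
  obtain ⟨hS1, hlen, h0, hpm, hans⟩ := main_inv m p k m.length hn le_rfl
  show (PySem.List.max? (runA m p k m.length) (fun x => x)).getD 0 = (runB m p k m.length).2.2
  have hmap : (PySem.List.pyRange 1 (m.length : Int) 1).map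
      (fun j => PySem.List.pyGetD (runA m p k m.length) j 0) = (runA m p k m.length).drop 1 := by
    conv_lhs => rw [show ((m.length : Nat) : Int) = (((runA m p k m.length).length : Nat) : Int) by
      rw [hlen]]
    exact PySem.List.map_pyGetD_pyRange' (runA m p k m.length) 0 (by omega)
  rw [hans, hmap]
  rcases hA : runA m p k m.length with _ | ⟨h, tl⟩
  · rw [hA] at hlen
    simp at hlen
    omega
  · rw [hA] at h0
    rw [PySem.List.pyGetD_zero] at h0
    simp only [List.getD_cons_zero] at h0
    rw [PySem.List.max?_id_cons]
    simp only [Option.getD_some, List.drop_succ_cons, List.drop_zero]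
    rw [h0]
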